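-- pv_equiv track=rewrite | github.com/AmaanWanie/LEETcode-questions | DailyQuestions/2549. Count Distinct Numbers on Board.py | distinctIntegers
-- ===== SOURCE A (Python) =====
-- def distinctIntegers(n: int) -> int:
--     result = set()
--     for i in range(1, n + 1):
--         for j in range(i + 1, n + 1):
--             if j % i == 1:
--                 result.add(i)
--     result.add(n)
--     return len(result)
-- ===== SOURCE B (Python) =====
-- def distinctIntegers(n: int) -> int:
--     # Closed form: every value 2..n-1 appears via j % i == 1 (j = i+1), plus n itself.
--     return max(1, n - 1)
-- ===== Notes on version B (the rewrite author's own statement) =====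
-- stated objective: faster
-- what changed: Replaced the O(n^2) double loop over (i,j) pairs with the closed form max(1, n-1).
import Mathlib
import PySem

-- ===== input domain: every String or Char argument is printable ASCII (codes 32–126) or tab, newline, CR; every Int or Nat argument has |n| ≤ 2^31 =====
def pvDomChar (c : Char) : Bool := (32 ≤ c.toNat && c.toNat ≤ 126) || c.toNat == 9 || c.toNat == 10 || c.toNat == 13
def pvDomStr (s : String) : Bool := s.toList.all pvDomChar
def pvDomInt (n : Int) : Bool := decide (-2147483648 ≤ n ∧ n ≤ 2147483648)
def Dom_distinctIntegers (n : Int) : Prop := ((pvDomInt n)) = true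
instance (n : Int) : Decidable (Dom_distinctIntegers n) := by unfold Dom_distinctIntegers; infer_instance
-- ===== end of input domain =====

-- B replaces A's O(n^2) double loop with the closed form max(1, n-1).

-- ===== PORT A =====
def distinctIntegers (n : Int) : Int :=
  let result : PySem.Set Int :=
    (PySem.List.pyRange 1 (n + 1) 1).foldl (fun result i =>
      (PySem.List.pyRange (i + 1) (n + 1) 1).foldl (fun result j =>
        if PySem.Int.mod j i = 1 then PySem.Set.add result i else result) result)
      PySem.Set.empty
  let result := PySem.Set.add result n
  PySem.Set.len result

-- ===== PORT B =====
def distinctIntegers_alt (n : Int) : Int := max 1 (n - 1)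

-- ===== PRECONDITION & SPEC =====
def Spec_distinctIntegers (n : Int) (out : Int) : Prop := out = distinctIntegers_alt n
instance (n : Int) (out : Int) : Decidable (Spec_distinctIntegers n out) := by unfold Spec_distinctIntegers; infer_instance

-- ===== CLAIM (what is proved, stated in full; the proofs are below) =====
def Claim_equal_distinctIntegers : Prop := ∀ (n : Int), Dom_distinctIntegers n → Spec_distinctIntegers n (distinctIntegers n)

-- ===== LEMMAS AND PROOFS =====

-- folding a constant add: empty list leaves s, nonempty list adds x once
theorem pv_foldl_const_add (l : List Int) (x : Int) (s : PySem.Set Int) :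
    l.foldl (fun acc (_ : Int) => PySem.Set.add acc x) s
      = if l = [] then s else PySem.Set.add s x := by
  induction l generalizing s with
  | nil => simp
  | cons a t ih =>
    simp only [List.foldl_cons, ih (PySem.Set.add s x)]
    by_cases ht : t = [] <;> simp [ht]

-- the inner loop of A: adds i exactly when 2 ≤ i and i + 1 ≤ n
theorem pv_inner (n i : Int) (hi : 1 ≤ i) (s : PySem.Set Int) :
    (PySem.List.pyRange (i + 1) (n + 1) 1).foldl
        (fun acc j => if PySem.Int.mod j i = 1 then PySem.Set.add acc i else acc) s
      = if 2 ≤ i ∧ i + 1 ≤ n then PySem.Set.add s i else s := by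
  rw [PySem.List.foldl_ite_eq_foldl_filter (fun j => PySem.Int.mod j i = 1)
        (fun acc _ => PySem.Set.add acc i), pv_foldl_const_add]
  by_cases hc : 2 ≤ i ∧ i + 1 ≤ n
  · rw [if_pos hc, if_neg]
    intro hnil
    have hmem : (i + 1) ∈ (PySem.List.pyRange (i + 1) (n + 1) 1).filter
        (fun j => decide (PySem.Int.mod j i = 1)) := by
      rw [List.mem_filter]
      constructor
      · rw [PySem.List.mem_pyRange_one]; omega
      · have hpos : (0:Int) < i := by omega
        have : PySem.Int.mod (i + 1) i = 1 := by
          rw [PySem.Int.mod_eq_emod_of_pos hpos]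
          have e : i + 1 = 1 + i * 1 := by ring
          rw [e, Int.add_mul_emod_self_left, Int.emod_eq_of_lt (by omega) (by omega)]
        simp [this]
    rw [hnil] at hmem
    simp at hmem
  · rw [if_neg hc, if_pos]
    rw [List.filter_eq_nil_iff]
    intro j hj
    rw [PySem.List.mem_pyRange_one] at hj
    simp only [decide_eq_true_eq]
    intro hmod
    by_cases h1 : i = 1
    · subst h1
      rw [PySem.Int.mod_eq_emod_of_pos (by omega)] at hmod
      omega
    · exact hc ⟨by omega, by omega⟩

-- folding add over a nodup list of fresh elements appends it
theorem pv_foldl_add_nodup (l : List Int) (s : PySem.Set Int)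
    (hnd : l.Nodup) (hfresh : ∀ x ∈ l, x ∉ s) :
    l.foldl PySem.Set.add s = s ++ l := by
  induction l generalizing s with
  | nil => simp
  | cons a t ih =>
    simp only [List.foldl_cons]
    have ha : a ∉ s := hfresh a (by simp)
    have hadd : PySem.Set.add s a = s ++ [a] := by
      simp [PySem.Set.add, PySem.Set.contains, ha]
    rw [hadd, ih (s ++ [a]) (List.nodup_cons.mp hnd).2]
    · simp
    · intro x hx
      simp only [List.mem_append, List.mem_singleton]
      rintro (h | rfl)
      · exact hfresh x (by simp [hx]) h
      · exact (List.nodup_cons.mp hnd).1 hx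

-- closed form of A's double loop
theorem pv_closed (n : Int) : distinctIntegers n = distinctIntegers_alt n := by
  by_cases h0 : n ≤ 0
  · have hnil : PySem.List.pyRange 1 (n + 1) 1 = [] :=
      PySem.List.pyRange_one_eq_nil (by omega)
    simp only [distinctIntegers, distinctIntegers_alt, hnil, List.foldl_nil]
    simp [PySem.Set.add, PySem.Set.empty, PySem.Set.contains, PySem.Set.len]
    omega
  · by_cases h1 : n = 1
    · subst h1; decide
    · have h2 : 2 ≤ n := by omega
      simp only [distinctIntegers, distinctIntegers_alt]
      have hcong :
          (PySem.List.pyRange 1 (n + 1) 1).foldl (fun result i =>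
              (PySem.List.pyRange (i + 1) (n + 1) 1).foldl (fun result j =>
                if PySem.Int.mod j i = 1 then PySem.Set.add result i else result) result)
            PySem.Set.empty
          = (PySem.List.pyRange 1 (n + 1) 1).foldl
              (fun s i => if 2 ≤ i ∧ i + 1 ≤ n then PySem.Set.add s i else s)
              PySem.Set.empty := by
        apply PySem.List.foldl_congr_mem
        intro acc i hi
        rw [PySem.List.mem_pyRange_one] at hi
        exact pv_inner n i (by omega) acc
      rw [hcong]
      have hsplit : PySem.List.pyRange 1 (n + 1) 1
          = [1] ++ PySem.List.pyRange 2 n 1 ++ [n] := by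
        rw [PySem.List.pyRange_one_append 1 2 (n + 1) (by omega) (by omega),
            PySem.List.pyRange_one_append 2 n (n + 1) (by omega) (by omega)]
        have e1 : PySem.List.pyRange 1 2 1 = [1] := by decide
        have e2 : PySem.List.pyRange n (n + 1) 1 = [n] := PySem.List.pyRange_one_singleton n
        rw [e1, e2]
        simp
      rw [hsplit, List.foldl_append, List.foldl_append]
      have hstep1 : ([1] : List Int).foldl
          (fun s i => if 2 ≤ i ∧ i + 1 ≤ n then PySem.Set.add s i else s)
          PySem.Set.empty = PySem.Set.empty := by
        simp
      rw [hstep1]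
      have hmid : (PySem.List.pyRange 2 n 1).foldl
          (fun s i => if 2 ≤ i ∧ i + 1 ≤ n then PySem.Set.add s i else s)
          PySem.Set.empty = PySem.List.pyRange 2 n 1 := by
        rw [PySem.List.foldl_congr_mem _ _ PySem.Set.add _ (by
          intro acc i hi
          rw [PySem.List.mem_pyRange_one] at hi
          rw [if_pos ⟨hi.1, by omega⟩])]
        rw [pv_foldl_add_nodup _ _ (PySem.List.nodup_pyRange_one 2 n) (by
          intro x _ hx
          simp [PySem.Set.empty] at hx)]
        simp [PySem.Set.empty]
      rw [hmid]
      have hstepn : ([n] : List Int).foldl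
          (fun s i => if 2 ≤ i ∧ i + 1 ≤ n then PySem.Set.add s i else s)
          (PySem.List.pyRange 2 n 1) = PySem.List.pyRange 2 n 1 := by
        simp only [List.foldl_cons, List.foldl_nil]
        rw [if_neg (by omega)]
      rw [hstepn]
      have hfresh : n ∉ PySem.List.pyRange 2 n 1 := by
        rw [PySem.List.mem_pyRange_one]; omega
      have hadd : PySem.Set.add (PySem.List.pyRange 2 n 1) n
          = PySem.List.pyRange 2 n 1 ++ [n] := by
        simp [PySem.Set.add, PySem.Set.contains, hfresh]
      rw [hadd]
      have hlen : (PySem.List.pyRange 2 n 1).length = (n - 2).toNat :=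
        PySem.List.length_pyRange_one 2 n
      simp [PySem.Set.len, hlen]
      omega

-- ===== VERDICT (by name: the statement is the Claim_ definition above) =====
theorem distinctIntegers_spec : Claim_equal_distinctIntegers := by
  intro n _
  unfold Spec_distinctIntegers
  exact pv_closed n
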